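-- pv_equiv track=rewrite | github.com/macabeus/kl-eod-decomp | scripts/generate_asm.py | _build_near_pool
-- ===== SOURCE A (Python) =====
-- def _build_near_pool(func_lines: list[str], extra: set[int] = ()) -> set[int]:
--     """Line indices within ±5 of any data directive or *extra* entry."""
--     sources = set()
--     for i, line in enumerate(func_lines):
--         s = line.strip()
--         if ".4byte" in s or ".2byte" in s:
--             sources.add(i)
--     sources |= set(extra)
--     near = set()
--     for i in sources:
--         for j in range(max(0, i - 5), min(len(func_lines), i + 6)):
--             near.add(j)
--     return near
-- ===== SOURCE B (Python) =====
-- def _add_interval(intervals, lo, hi):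
--     """Merge [lo, hi) into a sorted list of disjoint half-open intervals.
--
--     Return the new list together with the sub-ranges of [lo, hi) that were
--     not previously covered."""
--     left = [iv for iv in intervals if iv[1] <= lo]
--     right = [iv for iv in intervals if iv[0] >= hi]
--     middle = [iv for iv in intervals if iv[1] > lo and iv[0] < hi]
--     gaps = []
--     cur = lo
--     for a, b in middle:
--         if cur < a:
--             gaps.append((cur, a))
--         cur = max(cur, b)
--     if cur < hi:
--         gaps.append((cur, hi))
--     if middle:
--         lo = min(lo, middle[0][0])
--         hi = max(hi, middle[-1][1])
--     return left + [(lo, hi)] + right, gaps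
--
--
-- def _build_near_pool(func_lines, extra=()):
--     """Line indices within ±5 of any data directive or *extra* entry."""
--     n = len(func_lines)
--     sources = [i for i, line in enumerate(func_lines)
--                if ".4byte" in line.strip() or ".2byte" in line.strip()]
--     sources.extend(extra)
--     covered = []          # sorted disjoint half-open intervals of the result
--     near = set()
--     for i in sources:
--         lo, hi = max(0, i - 5), min(n, i + 6)
--         if lo < hi:
--             covered, gaps = _add_interval(covered, lo, hi)
--             for a, b in gaps:
--                 near.update(range(a, b))
--     return near
-- ===== Notes on version B (the rewrite author's own statement) =====
-- stated objective: alternative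
-- what changed: B replaces A's per-index hash-set union of the clamped windows with an insert-interval merge: it keeps the already-covered region as a sorted list of disjoint half-open intervals, merges each new window into it, and adds only the returned gap sub-ranges to the result set.
import Mathlib
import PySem

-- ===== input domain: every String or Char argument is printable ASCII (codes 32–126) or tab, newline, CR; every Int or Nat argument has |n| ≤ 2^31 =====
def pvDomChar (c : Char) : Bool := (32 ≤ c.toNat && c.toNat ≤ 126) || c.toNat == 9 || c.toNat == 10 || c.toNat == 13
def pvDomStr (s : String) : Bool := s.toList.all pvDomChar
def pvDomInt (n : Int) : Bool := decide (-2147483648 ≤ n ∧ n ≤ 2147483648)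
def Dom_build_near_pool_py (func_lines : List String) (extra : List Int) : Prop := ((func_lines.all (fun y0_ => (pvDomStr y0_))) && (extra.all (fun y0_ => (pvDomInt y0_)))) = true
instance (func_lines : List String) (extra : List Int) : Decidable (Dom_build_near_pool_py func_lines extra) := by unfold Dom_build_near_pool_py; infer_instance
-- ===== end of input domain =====

-- B tracks the covered region as a sorted list of disjoint half-open intervals (insert-interval
-- merge) and emits only the newly covered indices, instead of A's per-index set union — objective: alternative.


-- ===== PORT A =====
-- shared condition of both Pythons: s = line.strip(); ".4byte" in s or ".2byte" in s
def pvIsData (line : String) : Bool :=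
  PySem.Str.isIn ".4byte" (PySem.Str.strip line) || PySem.Str.isIn ".2byte" (PySem.Str.strip line)

def build_near_pool_py (func_lines : List String) (extra : List Int) : List Int :=
  let sources : PySem.Set Int :=
    (PySem.List.enumerate func_lines).foldl
      (fun s p => if pvIsData p.2 then PySem.Set.add s p.1 else s)
      PySem.Set.empty
  let sources := PySem.Set.union sources (PySem.Set.ofList extra)
  let near : PySem.Set Int :=
    sources.foldl
      (fun near i =>
        (PySem.List.pyRange (max 0 (i - 5)) (min (func_lines.length : Int) (i + 6)) 1).foldl
          (fun near j => PySem.Set.add near j) near)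
      PySem.Set.empty
  near

-- ===== PORT B =====
-- body of B's `for a, b in middle:` loop in _add_interval
def pvF (st : List (Int × Int) × Int) (ab : Int × Int) : List (Int × Int) × Int :=
  (if st.2 < ab.1 then st.1 ++ [(st.2, ab.1)] else st.1, max st.2 ab.2)

-- port of B's helper _add_interval
def pvAddInterval (intervals : List (Int × Int)) (lo hi : Int) :
    List (Int × Int) × List (Int × Int) :=
  let left := intervals.filter (fun iv => decide (iv.2 ≤ lo))
  let right := intervals.filter (fun iv => decide (hi ≤ iv.1))
  let middle := intervals.filter (fun iv => decide (lo < iv.2) && decide (iv.1 < hi))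
  let st := middle.foldl pvF ([], lo)
  let gaps := if st.2 < hi then st.1 ++ [(st.2, hi)] else st.1
  let lo := match middle.head? with | some ab => min lo ab.1 | none => lo
  let hi := match middle.getLast? with | some ab => max hi ab.2 | none => hi
  (left ++ [(lo, hi)] ++ right, gaps)

def build_near_pool_py_alt (func_lines : List String) (extra : List Int) : List Int :=
  let n : Int := (func_lines.length : Int)
  let sources : List Int :=
    (PySem.List.enumerate func_lines).foldl
      (fun l p => if pvIsData p.2 then l ++ [p.1] else l) []
  let sources := sources ++ extra
  let res :=
    sources.foldl
      (fun (st : List (Int × Int) × PySem.Set Int) i =>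
        if max 0 (i - 5) < min n (i + 6) then
          ((pvAddInterval st.1 (max 0 (i - 5)) (min n (i + 6))).1,
           (pvAddInterval st.1 (max 0 (i - 5)) (min n (i + 6))).2.foldl
             (fun near ab =>
               (PySem.List.pyRange ab.1 ab.2 1).foldl (fun s j => PySem.Set.add s j) near)
             st.2)
        else st)
      ([], PySem.Set.empty)
  res.2

-- ===== PRECONDITION & SPEC =====
def Spec_build_near_pool_py (func_lines : List String) (extra : List Int) (out : List Int) : Prop := out = build_near_pool_py_alt func_lines extra
instance (func_lines : List String) (extra : List Int) (out : List Int) : Decidable (Spec_build_near_pool_py func_lines extra out) := by unfold Spec_build_near_pool_py; infer_instance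

-- ===== CLAIM (what is proved, stated in full; the proofs are below) =====
def Claim_equal_build_near_pool_py : Prop := ∀ (func_lines : List String) (extra : List Int), Dom_build_near_pool_py func_lines extra → Spec_build_near_pool_py func_lines extra (build_near_pool_py func_lines extra)

-- ===== LEMMAS AND PROOFS =====

-- the clamped window of a source i
def pvWin (n i : Int) : List Int :=
  PySem.List.pyRange (max 0 (i - 5)) (min n (i + 6)) 1

-- "some source in P covers j"
def pvCov (P : List Int) (j : Int) : Bool :=
  P.any (fun s => decide (|s - j| ≤ 5))

-- the emission of the near-pool, source by source, with the prior-source list explicit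
def pvE (n : Int) (P : List Int) : List Int → List Int
  | [] => []
  | i :: t => (pvWin n i).filter (fun j => !pvCov P j) ++ pvE n (P ++ [i]) t

-- membership of j in a list of half-open intervals
def pvMemI (ivs : List (Int × Int)) (j : Int) : Bool :=
  ivs.any (fun ab => decide (ab.1 ≤ j ∧ j < ab.2))

-- sorted list of disjoint nonempty half-open intervals, all starting at or after m
def pvOKFrom : Int → List (Int × Int) → Prop
  | _, [] => True
  | m, (a, b) :: t => m ≤ a ∧ a < b ∧ pvOKFrom b t

-- flattening a list of intervals to the list of their elements
def pvFlat (gs : List (Int × Int)) : List Int :=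
  gs.flatMap (fun ab => PySem.List.pyRange ab.1 ab.2 1)

lemma pv_mem_win {n i j : Int} : j ∈ pvWin n i ↔ 0 ≤ j ∧ j < n ∧ |i - j| ≤ 5 := by
  simp only [pvWin, PySem.List.mem_pyRange_one, abs_le]
  omega

lemma pv_cov_append (P Q : List Int) (j : Int) : pvCov (P ++ Q) j = (pvCov P j || pvCov Q j) := by
  simp [pvCov]

lemma pv_cov_of_mem {P : List Int} {i j : Int} (hi : i ∈ P) (h : |i - j| ≤ 5) : pvCov P j = true := by
  simp only [pvCov, List.any_eq_true]
  exact ⟨i, hi, by simpa using h⟩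

-- folding Set.add over a duplicate-free list appends the new elements
lemma pv_addAll_nodup : ∀ (l : List Int) (s : List Int), l.Nodup →
    l.foldl (fun s j => PySem.Set.add s j) s = s ++ l.filter (fun j => !s.contains j) := by
  intro l
  induction l with
  | nil => intro s _; simp
  | cons x t ih =>
    intro s h
    rcases List.nodup_cons.mp h with ⟨hx, ht⟩
    show List.foldl _ (PySem.Set.add s x) t = _
    by_cases hc : s.contains x
    · have hmem : x ∈ s := by simpa using hc
      have ha : PySem.Set.add s x = s := by simp [PySem.Set.add, hmem]
      rw [ha, ih s ht, List.filter_cons]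
      simp [hmem]
    · have hnm : x ∉ s := by simpa using hc
      have ha : PySem.Set.add s x = s ++ [x] := by simp [PySem.Set.add, hnm]
      rw [ha, ih _ ht, List.filter_cons]
      have hf : t.filter (fun j => !(s ++ [x]).contains j) = t.filter (fun j => !s.contains j) := by
        apply List.filter_congr
        intro j hj
        have hne : j ≠ x := fun e => hx (e ▸ hj)
        simp [hne]
      rw [hf]
      simp [hnm]

lemma pv_E_append (n : Int) : ∀ (l₁ l₂ P : List Int),
    pvE n P (l₁ ++ l₂) = pvE n P l₁ ++ pvE n (P ++ l₁) l₂ := by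
  intro l₁
  induction l₁ with
  | nil => intro l₂ P; simp [pvE]
  | cons i t ih => intro l₂ P; simp [pvE, ih, List.append_assoc]

lemma pv_E_congr (n : Int) : ∀ (srcs P Q : List Int), (∀ j, pvCov P j = pvCov Q j) →
    pvE n P srcs = pvE n Q srcs := by
  intro srcs
  induction srcs with
  | nil => intro P Q _; rfl
  | cons i t ih =>
    intro P Q h
    simp only [pvE]
    congr 1
    · exact List.filter_congr (fun j _ => by rw [h])
    · exact ih _ _ (fun j => by rw [pv_cov_append, pv_cov_append, h])

lemma pv_emit_nil {n : Int} {P : List Int} {i : Int} (hi : i ∈ P) :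
    (pvWin n i).filter (fun j => !pvCov P j) = [] := by
  apply List.filter_eq_nil_iff.mpr
  intro j hj
  simp [pv_cov_of_mem hi (pv_mem_win.mp hj).2.2]

-- dedup of the source list (a fold of Set.add) does not change the emission
lemma pv_H (n : Int) : ∀ (xs C P : List Int),
    pvE n P (xs.foldl (fun s j => PySem.Set.add s j) C) = pvE n P C ++ pvE n (P ++ C) xs := by
  intro xs
  induction xs with
  | nil => intro C P; simp [pvE]
  | cons x t ih =>
    intro C P
    show pvE n P (List.foldl _ (PySem.Set.add C x) t) = _
    by_cases hc : C.contains x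
    · have hmem : x ∈ C := by simpa using hc
      have ha : PySem.Set.add C x = C := by simp [PySem.Set.add, hmem]
      rw [ha, ih C P]
      simp only [pvE]
      rw [pv_emit_nil (List.mem_append_right P hmem), List.nil_append]
      congr 1
      apply pv_E_congr
      intro j
      simp only [pv_cov_append]
      by_cases h5 : |x - j| ≤ 5
      · have hC : pvCov C j = true := pv_cov_of_mem hmem h5
        have h1 : pvCov [x] j = true := pv_cov_of_mem (List.mem_singleton_self x) h5
        simp [hC, h1]
      · have h1 : pvCov [x] j = false := by simp [pvCov, h5]
        simp [h1]
    · have hnm : x ∉ C := by simpa using hc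
      have ha : PySem.Set.add C x = C ++ [x] := by simp [PySem.Set.add, hnm]
      rw [ha, ih (C ++ [x]) P, pv_E_append]
      simp [pvE, List.append_assoc]

-- the nodup window fold of A, characterised by pvE
lemma pv_win_nodup (n i : Int) : (pvWin n i).Nodup :=
  PySem.List.nodup_pyRange_one _ _

lemma pv_main (n : Int) : ∀ (srcs P acc : List Int),
    acc.Nodup →
    (∀ j : Int, acc.contains j = (decide (0 ≤ j) && decide (j < n) && pvCov P j)) →
    srcs.foldl (fun near i => (pvWin n i).foldl (fun near j => PySem.Set.add near j) near) acc
      = acc ++ pvE n P srcs := by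
  intro srcs
  induction srcs with
  | nil => intro P acc _ _; simp [pvE]
  | cons i t ih =>
    intro P acc hnd hinv
    show List.foldl _ ((pvWin n i).foldl _ acc) t = _
    rw [pv_addAll_nodup _ _ (pv_win_nodup n i)]
    have hfs : (pvWin n i).filter (fun j => !acc.contains j)
        = (pvWin n i).filter (fun j => !pvCov P j) := by
      apply List.filter_congr
      intro j hj
      obtain ⟨h0, hn, _⟩ := pv_mem_win.mp hj
      rw [hinv j]
      simp [h0, hn]
    rw [hfs]
    have hnd' : (acc ++ (pvWin n i).filter (fun j => !pvCov P j)).Nodup := by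
      refine List.Nodup.append hnd ((pv_win_nodup n i).filter _) ?_
      intro j hja hjf
      have h1 : acc.contains j = true := by simpa using hja
      have h2 : pvCov P j = false := by simpa using (List.mem_filter.mp hjf).2
      obtain ⟨h0, hn, _⟩ := pv_mem_win.mp (List.mem_filter.mp hjf).1
      rw [hinv j] at h1
      simp [h0, hn, h2] at h1
    have hinv' : ∀ j : Int, (acc ++ (pvWin n i).filter (fun j => !pvCov P j)).contains j
        = (decide (0 ≤ j) && decide (j < n) && pvCov (P ++ [i]) j) := by
      intro j
      rw [List.contains_append, hinv j, pv_cov_append]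
      have hfc : ((pvWin n i).filter (fun j => !pvCov P j)).contains j
          = (decide (j ∈ pvWin n i) && !pvCov P j) := by
        rw [Bool.eq_iff_iff]
        by_cases hw : j ∈ pvWin n i <;> by_cases hcv : pvCov P j = true <;>
          simp [List.mem_filter, hw, hcv]
      rw [hfc]
      have hcov1 : pvCov [i] j = decide (|i - j| ≤ 5) := by simp [pvCov]
      rw [hcov1]
      by_cases h0 : 0 ≤ j <;> by_cases h1 : j < n <;> by_cases hcv : pvCov P j = true <;>
        by_cases h5 : |i - j| ≤ 5 <;>
        simp_all [pv_mem_win, Bool.and_assoc]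
    rw [ih (P ++ [i]) _ hnd' hinv']
    simp [pvE, List.append_assoc]

-- the two phase-one folds build the same source list
lemma pv_srcs_eq : ∀ (xs : List String) (k : Int) (acc : List Int),
    (∀ a ∈ acc, a < k) →
    (PySem.List.enumerate xs k).foldl (fun s p => if pvIsData p.2 then PySem.Set.add s p.1 else s) acc
      = (PySem.List.enumerate xs k).foldl (fun l p => if pvIsData p.2 then l ++ [p.1] else l) acc := by
  intro xs
  induction xs with
  | nil => intro k acc _; simp [PySem.List.enumerate_nil]
  | cons x t ih =>
    intro k acc hlt
    rw [PySem.List.enumerate_cons]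
    simp only [List.foldl_cons]
    by_cases hcnd : pvIsData x
    · have hnm : k ∉ acc := fun h => lt_irrefl k (hlt k h)
      have ha : PySem.Set.add acc k = acc ++ [k] := by simp [PySem.Set.add, hnm]
      simp only [hcnd, if_true]
      rw [ha]
      apply ih
      intro a ha'
      rcases List.mem_append.mp ha' with h | h
      · have := hlt a h; omega
      · simp at h; omega
    · simp only [hcnd]
      apply ih
      intro a h
      have := hlt a h; omega

-- ---- interval machinery for B ----

lemma pvOK_bounds : ∀ (l : List (Int × Int)) (m : Int), pvOKFrom m l →
    ∀ iv ∈ l, m ≤ iv.1 ∧ iv.1 < iv.2 := by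
  intro l
  induction l with
  | nil => intro m _ iv h; cases h
  | cons ab t ih =>
    intro m h iv hm
    obtain ⟨h1, h2, h3⟩ := h
    rcases List.mem_cons.mp hm with rfl | hm
    · exact ⟨h1, h2⟩
    · have := ih ab.2 h3 iv hm
      omega

lemma pvMemI_lb {l : List (Int × Int)} {c j : Int} (h : ∀ iv ∈ l, c ≤ iv.1) (hj : j < c) :
    pvMemI l j = false := by
  simp only [pvMemI, List.any_eq_false]
  intro iv hiv
  have := h iv hiv
  simp only [decide_eq_true_eq]
  omega

lemma pvFlat_append (x y : List (Int × Int)) : pvFlat (x ++ y) = pvFlat x ++ pvFlat y := by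
  simp [pvFlat]

lemma pvF_prefix : ∀ (mid : List (Int × Int)) (g : List (Int × Int)) (cur : Int),
    mid.foldl pvF (g, cur)
      = (g ++ (mid.foldl pvF ([], cur)).1, (mid.foldl pvF ([], cur)).2) := by
  intro mid
  induction mid with
  | nil => intro g cur; simp
  | cons ab t ih =>
    intro g cur
    simp only [List.foldl_cons]
    by_cases hc : cur < ab.1
    · have h1 : pvF (g, cur) ab = (g ++ [(cur, ab.1)], max cur ab.2) := by simp [pvF, hc]
      have h2 : pvF ([], cur) ab = ([(cur, ab.1)], max cur ab.2) := by simp [pvF, hc]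
      rw [h1, h2, ih (g ++ [(cur, ab.1)]), ih [(cur, ab.1)]]
      simp [List.append_assoc]
    · have h1 : pvF (g, cur) ab = (g, max cur ab.2) := by simp [pvF, hc]
      have h2 : pvF ([], cur) ab = ([], max cur ab.2) := by simp [pvF, hc]
      rw [h1, h2, ih g]

-- main specification of _add_interval
lemma pvAI : ∀ (ivs : List (Int × Int)) (m lo hi : Int), pvOKFrom m ivs → lo < hi →
    (pvFlat (pvAddInterval ivs lo hi).2
        = (PySem.List.pyRange lo hi 1).filter (fun j => !pvMemI ivs j))
    ∧ (∀ j : Int, pvMemI (pvAddInterval ivs lo hi).1 j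
        = (pvMemI ivs j || decide (lo ≤ j ∧ j < hi)))
    ∧ pvOKFrom (min m lo) (pvAddInterval ivs lo hi).1 := by
  intro ivs
  induction ivs with
  | nil =>
    intro m lo hi _ hlh
    refine ⟨?_, ?_, ?_⟩
    · simp [pvAddInterval, hlh, pvFlat, pvMemI]
    · intro j; simp [pvAddInterval, pvMemI]
    · simp only [pvAddInterval]
      exact ⟨min_le_right m lo, hlh, trivial⟩
  | cons ab t ih =>
    rcases ab with ⟨a, b⟩
    intro m lo hi hOK hlh
    obtain ⟨hma, hab, ht⟩ := hOK
    have hbnd := pvOK_bounds t b ht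
    by_cases h1 : b ≤ lo
    · -- the head interval lies entirely left of the window
      have hcomp : pvAddInterval ((a, b) :: t) lo hi
          = ((a, b) :: (pvAddInterval t lo hi).1, (pvAddInterval t lo hi).2) := by
        simp only [pvAddInterval, List.filter_cons]
        simp [h1, show ¬ hi ≤ a by omega, show ¬ lo < b by omega]
      obtain ⟨ihA, ihB, ihC⟩ := ih b lo hi ht hlh
      refine ⟨?_, ?_, ?_⟩
      · rw [hcomp]
        dsimp only
        rw [ihA]
        apply List.filter_congr
        intro j hj
        have hjm := PySem.List.mem_pyRange_one.mp hj
        simp only [pvMemI, List.any_cons]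
        simp [show ¬ (a ≤ j ∧ j < b) by omega]
      · intro j
        rw [hcomp]
        have hB := ihB j
        simp only [pvMemI, List.any_cons] at hB ⊢
        rw [hB, Bool.or_assoc]
      · rw [hcomp]
        refine ⟨by omega, hab, ?_⟩
        have : min b lo = b := min_eq_left h1
        rw [this] at ihC
        exact ihC
    · by_cases h2 : hi ≤ a
      · -- the whole list lies right of the window
        have hall : ∀ iv ∈ (a, b) :: t, hi ≤ iv.1 ∧ iv.1 < iv.2 := by
          intro iv hiv
          rcases List.mem_cons.mp hiv with rfl | hiv
          · exact ⟨h2, hab⟩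
          · have := hbnd iv hiv; omega
        have hleft : ((a, b) :: t).filter (fun iv => decide (iv.2 ≤ lo)) = [] := by
          apply List.filter_eq_nil_iff.mpr
          intro iv hiv
          have := hall iv hiv
          simp only [decide_eq_true_eq]
          omega
        have hright : ((a, b) :: t).filter (fun iv => decide (hi ≤ iv.1)) = (a, b) :: t := by
          apply List.filter_eq_self.mpr
          intro iv hiv
          simp [(hall iv hiv).1]
        have hmid : ((a, b) :: t).filter (fun iv => decide (lo < iv.2) && decide (iv.1 < hi)) = [] := by
          apply List.filter_eq_nil_iff.mpr
          intro iv hiv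
          have := hall iv hiv
          simp only [Bool.and_eq_true, decide_eq_true_eq, not_and]
          omega
        refine ⟨?_, ?_, ?_⟩
        · simp only [pvAddInterval, hleft, hright, hmid]
          simp only [List.foldl_nil, hlh, if_true]
          have hflt : (PySem.List.pyRange lo hi 1).filter (fun j => !pvMemI ((a, b) :: t) j)
              = PySem.List.pyRange lo hi 1 := by
            apply List.filter_eq_self.mpr
            intro j hj
            have hjm := PySem.List.mem_pyRange_one.mp hj
            rw [pvMemI_lb (fun iv hiv => (hall iv hiv).1) (by omega)]
            rfl
          rw [hflt]
          simp [pvFlat]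
        · intro j
          simp only [pvAddInterval, hleft, hright, hmid]
          simp only [List.nil_append, List.cons_append, List.head?_nil, List.getLast?_nil]
          simp only [pvMemI, List.any_cons]
          ac_rfl
        · simp only [pvAddInterval, hleft, hright, hmid]
          simp only [List.nil_append, List.cons_append, List.foldl_nil]
          exact ⟨min_le_right m lo, hlh, h2, hab, ht⟩
      · -- the head interval overlaps the window
        have h3a : lo < b := by omega
        have h3b : a < hi := by omega
        have hleft : ((a, b) :: t).filter (fun iv => decide (iv.2 ≤ lo)) = [] := by
          apply List.filter_eq_nil_iff.mpr
          intro iv hiv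
          rcases List.mem_cons.mp hiv with rfl | hiv
          · simp only [decide_eq_true_eq]; omega
          · have := hbnd iv hiv
            simp only [decide_eq_true_eq]; omega
        have hrightcons : ((a, b) :: t).filter (fun iv => decide (hi ≤ iv.1))
            = t.filter (fun iv => decide (hi ≤ iv.1)) := by
          rw [List.filter_cons]
          simp [show ¬ hi ≤ a by omega]
        have hmid : ((a, b) :: t).filter (fun iv => decide (lo < iv.2) && decide (iv.1 < hi))
            = (a, b) :: t.filter (fun iv => decide (b < iv.2) && decide (iv.1 < hi)) := by
          rw [List.filter_cons]
          simp only [show (decide (lo < b) && decide (a < hi)) = true by simp [h3a, h3b], if_true]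
          congr 1
          apply List.filter_congr
          intro iv hiv
          have := hbnd iv hiv
          simp [show lo < iv.2 by omega, show b < iv.2 by omega]
        by_cases hhb : hi ≤ b
        · -- the window ends inside the head interval: the head is the only middle interval
          have hmidT : t.filter (fun iv => decide (b < iv.2) && decide (iv.1 < hi)) = [] := by
            apply List.filter_eq_nil_iff.mpr
            intro iv hiv
            have := hbnd iv hiv
            simp only [Bool.and_eq_true, decide_eq_true_eq, not_and]
            omega
          have hrightT : t.filter (fun iv => decide (hi ≤ iv.1)) = t := by
            apply List.filter_eq_self.mpr
            intro iv hiv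
            have := hbnd iv hiv
            simp only [decide_eq_true_eq]
            omega
          rw [hmidT] at hmid
          have hpf : pvF ([], lo) (a, b) = ((if lo < a then [(lo, a)] else []), b) := by
            simp [pvF, max_eq_right (le_of_lt h3a)]
          refine ⟨?_, ?_, ?_⟩
          · simp only [pvAddInterval, hleft, hrightcons, hmid, hrightT]
            simp only [List.foldl_cons, List.foldl_nil, hpf]
            simp only [show ¬ (b < hi) by omega, if_false]
            have hstep1 : ∀ j ∈ PySem.List.pyRange lo hi 1,
                (!pvMemI ((a, b) :: t) j) = decide (j < a) := by
              intro j hj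
              have hjm := PySem.List.mem_pyRange_one.mp hj
              simp only [pvMemI, List.any_cons]
              rw [show (t.any fun ab => decide (ab.1 ≤ j ∧ j < ab.2)) = false from
                pvMemI_lb (fun iv hiv => (hbnd iv hiv).1) (by omega)]
              by_cases hja : j < a
              · simp [show ¬ (a ≤ j ∧ j < b) by omega, hja]
              · simp [show (a ≤ j ∧ j < b) by omega, hja]
            rw [List.filter_congr hstep1]
            by_cases hla : lo < a
            · rw [PySem.List.pyRange_one_append lo a hi (le_of_lt hla) (le_of_lt h3b)]
              rw [List.filter_append]
              rw [List.filter_eq_self.mpr (fun j hj => by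
                    have := PySem.List.mem_pyRange_one.mp hj
                    simp only [decide_eq_true_eq]; omega)]
              rw [List.filter_eq_nil_iff.mpr (fun j hj => by
                    have := PySem.List.mem_pyRange_one.mp hj
                    simp only [decide_eq_true_eq]; omega)]
              simp [hla, pvFlat]
            · rw [List.filter_eq_nil_iff.mpr (fun j hj => by
                    have := PySem.List.mem_pyRange_one.mp hj
                    simp only [decide_eq_true_eq]; omega)]
              simp [hla, pvFlat]
          · intro j
            simp only [pvAddInterval, hleft, hrightcons, hmid, hrightT]
            simp only [List.nil_append, List.cons_append, List.head?_cons, List.getLast?_singleton]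
            rw [Bool.eq_iff_iff]
            simp only [pvMemI, List.any_cons, Bool.or_eq_true, decide_eq_true_eq]
            by_cases hT : (t.any fun ab => decide (ab.1 ≤ j ∧ j < ab.2)) = true <;>
              simp only [hT] <;> simp <;> omega
          · simp only [pvAddInterval, hleft, hrightcons, hmid, hrightT]
            simp only [List.nil_append, List.cons_append, List.head?_cons, List.getLast?_singleton]
            refine ⟨by omega, by omega, ?_⟩
            rw [max_eq_right hhb]
            exact ht
        · -- the window extends past the head interval: recurse on the tail from b
          replace hhb : b < hi := by omega
          set midT := t.filter (fun iv => decide (b < iv.2) && decide (iv.1 < hi)) with hmidT_def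
          set rightT := t.filter (fun iv => decide (hi ≤ iv.1)) with hrightT_def
          have hleft' : t.filter (fun iv => decide (iv.2 ≤ b)) = [] := by
            apply List.filter_eq_nil_iff.mpr
            intro iv hiv
            have := hbnd iv hiv
            simp only [decide_eq_true_eq]
            omega
          have hmem_midT : ∀ iv ∈ midT, b ≤ iv.1 ∧ iv.1 < iv.2 :=
            fun iv hiv => hbnd iv (List.mem_of_mem_filter hiv)
          set H2 := (match midT.getLast? with | some c => max hi c.2 | none => hi) with hH2_def
          have hhiH2 : hi ≤ H2 := by
            rw [hH2_def]
            cases midT.getLast? with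
            | none => exact le_refl hi
            | some c => exact le_max_left _ _
          set S := midT.foldl pvF ([], b) with hS_def
          set gapsR := (if S.2 < hi then S.1 ++ [(S.2, hi)] else S.1) with hgapsR_def
          have hr : pvAddInterval t b hi = ([(b, H2)] ++ rightT, gapsR) := by
            simp only [pvAddInterval, hleft', ← hmidT_def, ← hrightT_def, ← hS_def, ← hgapsR_def,
              ← hH2_def]
            cases hmt : midT with
            | nil => simp [hH2_def, hmt]
            | cons c cs =>
              have hbc : b ≤ c.1 :=
                (hmem_midT c (by rw [hmt]; exact List.mem_cons_self)).1
              simp [hH2_def, hmt, min_eq_left hbc]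
          have hcomp : pvAddInterval ((a, b) :: t) lo hi
              = ([(min lo a, H2)] ++ rightT, (if lo < a then [(lo, a)] else []) ++ gapsR) := by
            simp only [pvAddInterval, hleft, hrightcons, hmid, ← hrightT_def, ← hmidT_def]
            simp only [List.foldl_cons,
              show pvF ([], lo) (a, b) = ((if lo < a then [(lo, a)] else []), b) from by
                simp [pvF, max_eq_right (le_of_lt h3a)]]
            rw [pvF_prefix midT _ b, ← hS_def]
            simp only [List.head?_cons]
            cases hmt : midT with
            | nil =>
              simp only [hmt] at hS_def
              simp only [List.getLast?_singleton, hgapsR_def, hS_def, List.foldl_nil]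
              simp [hH2_def, hmt, max_eq_left (le_of_lt hhb), hhb, List.append_assoc]
            | cons c cs =>
              simp only [List.getLast?_cons_cons, ← hH2_def.symm]
              rw [hgapsR_def]
              by_cases hSh : S.2 < hi <;> simp [hSh, hH2_def, hmt, List.append_assoc]
          obtain ⟨ihA, ihB, ihC⟩ := ih b b hi ht hhb
          rw [hr] at ihA ihB ihC
          refine ⟨?_, ?_, ?_⟩
          · rw [hcomp]
            dsimp only
            rw [pvFlat_append, ihA]
            have e3 : List.filter (fun j => !pvMemI ((a, b) :: t) j) (PySem.List.pyRange b hi 1)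
                = List.filter (fun j => !pvMemI t j) (PySem.List.pyRange b hi 1) := by
              apply List.filter_congr
              intro j hj
              have := PySem.List.mem_pyRange_one.mp hj
              simp only [pvMemI, List.any_cons]
              simp [show ¬ (a ≤ j ∧ j < b) by omega]
            by_cases hla : lo < a
            · have hsplit : PySem.List.pyRange lo hi 1
                  = PySem.List.pyRange lo a 1 ++ PySem.List.pyRange a b 1
                    ++ PySem.List.pyRange b hi 1 := by
                rw [PySem.List.pyRange_one_append lo b hi (by omega) (by omega),
                  PySem.List.pyRange_one_append lo a b (by omega) (by omega)]
              rw [hsplit, List.filter_append, List.filter_append]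
              have e1 : List.filter (fun j => !pvMemI ((a, b) :: t) j) (PySem.List.pyRange lo a 1)
                  = PySem.List.pyRange lo a 1 := by
                apply List.filter_eq_self.mpr
                intro j hj
                have := PySem.List.mem_pyRange_one.mp hj
                simp only [pvMemI, List.any_cons, Bool.not_eq_eq_eq_not, Bool.not_true]
                rw [show (t.any fun ab => decide (ab.1 ≤ j ∧ j < ab.2)) = false from
                  pvMemI_lb (fun iv hiv => (hbnd iv hiv).1) (by omega)]
                simp [show ¬ (a ≤ j ∧ j < b) by omega]
              have e2 : List.filter (fun j => !pvMemI ((a, b) :: t) j) (PySem.List.pyRange a b 1)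
                  = [] := by
                apply List.filter_eq_nil_iff.mpr
                intro j hj
                have := PySem.List.mem_pyRange_one.mp hj
                simp only [pvMemI, List.any_cons]
                simp [show (a ≤ j ∧ j < b) by omega]
              rw [e1, e2, e3]
              simp [hla, pvFlat]
            · have hsplit : PySem.List.pyRange lo hi 1
                  = PySem.List.pyRange lo b 1 ++ PySem.List.pyRange b hi 1 :=
                PySem.List.pyRange_one_append lo b hi (by omega) (by omega)
              rw [hsplit, List.filter_append]
              have e1 : List.filter (fun j => !pvMemI ((a, b) :: t) j) (PySem.List.pyRange lo b 1)
                  = [] := by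
                apply List.filter_eq_nil_iff.mpr
                intro j hj
                have := PySem.List.mem_pyRange_one.mp hj
                simp only [pvMemI, List.any_cons]
                simp [show (a ≤ j ∧ j < b) by omega]
              rw [e1, e3]
              simp [hla, pvFlat]
          · intro j
            rw [hcomp]
            dsimp only
            have key := Bool.eq_iff_iff.mp (ihB j)
            simp only [pvMemI, List.singleton_append, List.any_cons, Bool.or_eq_true,
              decide_eq_true_eq] at key
            rw [Bool.eq_iff_iff]
            simp only [pvMemI, List.singleton_append, List.any_cons, Bool.or_eq_true,
              decide_eq_true_eq]
            by_cases hR : (rightT.any fun ab => decide (ab.1 ≤ j ∧ j < ab.2)) = true <;>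
              by_cases hT : (t.any fun ab => decide (ab.1 ≤ j ∧ j < ab.2)) = true <;>
              simp only [hR, hT] at key ⊢ <;>
              simp at key ⊢ <;>
              omega
          · rw [hcomp]
            dsimp only
            simp only [min_self] at ihC
            obtain ⟨-, -, hOK2⟩ := ihC
            exact ⟨by omega, by omega, hOK2⟩


-- nested near-update fold = fold over the flattened gaps
lemma pv_foldl_flat : ∀ (gs : List (Int × Int)) (near : List Int),
    gs.foldl (fun nr ab => (PySem.List.pyRange ab.1 ab.2 1).foldl
        (fun s j => PySem.Set.add s j) nr) near
      = (pvFlat gs).foldl (fun s j => PySem.Set.add s j) near := by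
  intro gs
  induction gs with
  | nil => intro near; simp [pvFlat]
  | cons ab t ih =>
    intro near
    simp only [List.foldl_cons, pvFlat, List.flatMap_cons, List.foldl_append]
    exact ih _

-- B's main loop, characterised by pvE
lemma pvB_main (n : Int) : ∀ (srcs : List Int) (covered : List (Int × Int))
    (near P : List Int) (m : Int),
    pvOKFrom m covered →
    (∀ j : Int, pvMemI covered j = (decide (0 ≤ j) && decide (j < n) && pvCov P j)) →
    (∀ j : Int, near.contains j = pvMemI covered j) →
    (srcs.foldl
      (fun (st : List (Int × Int) × PySem.Set Int) i =>
        if max 0 (i - 5) < min n (i + 6) then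
          ((pvAddInterval st.1 (max 0 (i - 5)) (min n (i + 6))).1,
           (pvAddInterval st.1 (max 0 (i - 5)) (min n (i + 6))).2.foldl
             (fun near ab =>
               (PySem.List.pyRange ab.1 ab.2 1).foldl (fun s j => PySem.Set.add s j) near)
             st.2)
        else st)
      (covered, near)).2 = near ++ pvE n P srcs := by
  intro srcs
  induction srcs with
  | nil => intro covered near P m _ _ _; simp [pvE]
  | cons i t ihs =>
    intro covered near P m hOK hmem hnear
    simp only [List.foldl_cons]
    set lo := max 0 (i - 5) with hlo_def
    set hi := min n (i + 6) with hhi_def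
    have hwin : pvWin n i = PySem.List.pyRange lo hi 1 := rfl
    by_cases hlh : lo < hi
    · rw [if_pos hlh]
      obtain ⟨hA, hB, hC⟩ := pvAI covered m lo hi hOK hlh
      set flat := (PySem.List.pyRange lo hi 1).filter (fun j => !pvMemI covered j) with hflat_def
      have hfresh : ∀ j ∈ flat, near.contains j = false := by
        intro j hj
        rw [hnear j]
        simpa using (List.mem_filter.mp hj).2
      have hnodup : flat.Nodup := (PySem.List.nodup_pyRange_one _ _).filter _
      have hupd : (pvAddInterval covered lo hi).2.foldl
            (fun near ab => (PySem.List.pyRange ab.1 ab.2 1).foldl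
              (fun s j => PySem.Set.add s j) near) near
          = near ++ flat := by
        rw [pv_foldl_flat, hA, pv_addAll_nodup flat near hnodup]
        congr 1
        apply List.filter_eq_self.mpr
        intro j hj
        simpa using hfresh j hj
      rw [hupd]
      have hflatE : flat = (pvWin n i).filter (fun j => !pvCov P j) := by
        rw [hwin, hflat_def]
        apply List.filter_congr
        intro j hj
        have hjm := PySem.List.mem_pyRange_one.mp hj
        rw [hmem j]
        simp [show (0:Int) ≤ j by omega, show j < n by omega]
      have hmem' : ∀ j : Int, pvMemI (pvAddInterval covered lo hi).1 j
          = (decide (0 ≤ j) && decide (j < n) && pvCov (P ++ [i]) j) := by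
        intro j
        rw [hB j, hmem j, pv_cov_append]
        rw [show pvCov [i] j = decide (i - 5 ≤ j ∧ j ≤ i + 5) from by
          simp only [pvCov, List.any_cons, List.any_nil, Bool.or_false]
          exact decide_eq_decide.mpr (by rw [abs_le]; omega)]
        by_cases hcv : pvCov P j = true
        · rw [Bool.eq_iff_iff]
          simp [hcv] <;> omega
        · rw [Bool.eq_iff_iff]
          simp [hcv] <;> omega
      have hnear' : ∀ j : Int, (near ++ flat).contains j
          = pvMemI (pvAddInterval covered lo hi).1 j := by
        intro j
        rw [List.contains_append, hnear j, hB j]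
        have hfl : flat.contains j = (decide (lo ≤ j ∧ j < hi) && !pvMemI covered j) := by
          rw [Bool.eq_iff_iff]
          simp only [List.contains_iff_mem, hflat_def, List.mem_filter,
            PySem.List.mem_pyRange_one, Bool.and_eq_true, decide_eq_true_eq,
            Bool.not_eq_eq_eq_not, Bool.not_true]
        rw [hfl]
        cases hcv : pvMemI covered j <;> simp
      rw [ihs (pvAddInterval covered lo hi).1 (near ++ flat) (P ++ [i]) (min m lo) hC hmem' hnear']
      simp only [pvE]
      rw [hflatE]
      simp [List.append_assoc]
    · rw [if_neg hlh]
      have hwin0 : pvWin n i = [] := by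
        rw [hwin]
        exact PySem.List.pyRange_one_eq_nil (by omega)
      have hmem' : ∀ j : Int, pvMemI covered j
          = (decide (0 ≤ j) && decide (j < n) && pvCov (P ++ [i]) j) := by
        intro j
        rw [hmem j, pv_cov_append]
        rw [show pvCov [i] j = decide (i - 5 ≤ j ∧ j ≤ i + 5) from by
          simp only [pvCov, List.any_cons, List.any_nil, Bool.or_false]
          exact decide_eq_decide.mpr (by rw [abs_le]; omega)]
        by_cases hcv : pvCov P j = true
        · rw [Bool.eq_iff_iff]
          simp [hcv] <;> omega
        · rw [Bool.eq_iff_iff]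
          simp [hcv] <;> omega
      rw [ihs covered near (P ++ [i]) m hOK hmem' hnear]
      simp [pvE, hwin0]

lemma pv_AB (func_lines : List String) (extra : List Int) :
    build_near_pool_py func_lines extra = build_near_pool_py_alt func_lines extra := by
  show ((PySem.Set.ofList extra).foldl (fun s j => PySem.Set.add s j)
          ((PySem.List.enumerate func_lines).foldl
            (fun s p => if pvIsData p.2 then PySem.Set.add s p.1 else s) [])).foldl
        (fun near i => (pvWin (func_lines.length : Int) i).foldl
          (fun near j => PySem.Set.add near j) near) []
      = ((((PySem.List.enumerate func_lines).foldl
              (fun l p => if pvIsData p.2 then l ++ [p.1] else l) []) ++ extra).foldl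
          (fun (st : List (Int × Int) × PySem.Set Int) i =>
            if max 0 (i - 5) < min (func_lines.length : Int) (i + 6) then
              ((pvAddInterval st.1 (max 0 (i - 5)) (min (func_lines.length : Int) (i + 6))).1,
               (pvAddInterval st.1 (max 0 (i - 5)) (min (func_lines.length : Int) (i + 6))).2.foldl
                 (fun near ab => (PySem.List.pyRange ab.1 ab.2 1).foldl
                   (fun s j => PySem.Set.add s j) near) st.2)
            else st)
          ([], [])).2
  rw [pv_srcs_eq func_lines 0 [] (by intro a h; cases h)]
  rw [pv_main (func_lines.length : Int) _ [] [] List.nodup_nil (by intro j; simp [pvCov])]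
  rw [pvB_main (func_lines.length : Int) _ [] [] [] 0 trivial
    (by intro j; simp [pvMemI, pvCov]) (by intro j; simp [pvMemI])]
  simp only [List.nil_append]
  rw [pv_H (func_lines.length : Int) (PySem.Set.ofList extra) _ []]
  rw [show PySem.Set.ofList extra = extra.foldl (fun s j => PySem.Set.add s j) [] from rfl]
  rw [pv_H (func_lines.length : Int) extra []]
  rw [pv_E_append (func_lines.length : Int) _ extra []]
  simp [pvE]

-- ===== VERDICT (by name: the statement is the Claim_ definition above) =====
theorem build_near_pool_py_spec : Claim_equal_build_near_pool_py := by
  intro func_lines extra _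
  show build_near_pool_py func_lines extra = build_near_pool_py_alt func_lines extra
  exact pv_AB func_lines extra
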